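-- pv_equiv track=rewrite | github.com/nicholasrokosz/common-sense-dsa | 9-4.py | str_reverse
-- ===== SOURCE A (Python) =====
-- from collections import deque
--
-- def str_reverse(str):
--     stack = deque()
--     result_str = ""
--
--     for char in str:
--         stack.append(char)
--
--     while len(stack) > 0:
--         result_str += stack.pop()
--
--     return result_str
-- ===== SOURCE B (Python) =====
-- def str_reverse(str):
--     chars = list(str)
--     i = 0
--     j = len(chars) - 1
--     while i < j:
--         chars[i], chars[j] = chars[j], chars[i]
--         i += 1
--         j -= 1
--     return "".join(chars)
-- ===== Notes on version B (the rewrite author's own statement) =====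
-- stated objective: alternative
-- what changed: Replaces the push-all-then-pop-all deque stack with string accumulation by a single inward-converging two-pointer pass that swaps characters in place in a mutable list and joins once.
import Mathlib
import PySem

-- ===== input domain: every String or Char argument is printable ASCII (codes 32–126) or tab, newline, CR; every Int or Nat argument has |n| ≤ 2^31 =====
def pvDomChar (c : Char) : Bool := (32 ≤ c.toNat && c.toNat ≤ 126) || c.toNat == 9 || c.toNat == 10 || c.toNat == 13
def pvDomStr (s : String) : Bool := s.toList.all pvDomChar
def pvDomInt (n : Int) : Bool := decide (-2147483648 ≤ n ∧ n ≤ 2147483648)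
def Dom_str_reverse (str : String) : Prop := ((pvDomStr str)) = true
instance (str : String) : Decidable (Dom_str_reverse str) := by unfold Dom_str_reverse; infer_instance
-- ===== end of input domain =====

-- B replaces A's push-all-then-pop-all deque stack by a single inward-converging
-- two-pointer swap pass over a character buffer, joined once at the end.

-- ===== PORT A =====
-- for char in str: stack.append(char)
def pvPushLoop (chars : List Char) (stack : List Char) : List Char :=
  match chars with
  | [] => stack
  | c :: rest => pvPushLoop rest (stack ++ [c])

-- while len(stack) > 0: result_str += stack.pop()
def pvDrainLoop (stack : List Char) (result : String) : String :=
  if stack.length > 0 then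
    pvDrainLoop stack.dropLast (result.push (stack.getLast?.getD ' '))
  else result
termination_by stack.length
decreasing_by simp [List.length_dropLast]; omega

def str_reverse (str : String) : String :=
  pvDrainLoop (pvPushLoop str.toList []) ""

-- ===== PORT B =====
-- while i < j: chars[i], chars[j] = chars[j], chars[i]; i += 1; j -= 1
def pvSwapLoop (chars : List Char) (i j : Nat) : List Char :=
  if i < j then
    pvSwapLoop ((chars.set i (chars.getD j ' ')).set j (chars.getD i ' ')) (i + 1) (j - 1)
  else chars
termination_by j - i
decreasing_by omega

def str_reverse_alt (str : String) : String :=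
  let chars := str.toList
  String.ofList (pvSwapLoop chars 0 (chars.length - 1))

-- ===== PRECONDITION & SPEC =====
def Spec_str_reverse (str : String) (out : String) : Prop := out = str_reverse_alt str
instance (str : String) (out : String) : Decidable (Spec_str_reverse str out) := by unfold Spec_str_reverse; infer_instance

-- ===== CLAIM (what is proved, stated in full; the proofs are below) =====
def Claim_equal_str_reverse : Prop := ∀ (str : String), Dom_str_reverse str → Spec_str_reverse str (str_reverse str)

-- ===== LEMMAS AND PROOFS =====

theorem pvPushLoop_eq (chars stack : List Char) : pvPushLoop chars stack = stack ++ chars := by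
  induction chars generalizing stack with
  | nil => simp [pvPushLoop]
  | cons c rest ih => simp [pvPushLoop, ih]

theorem pvDrainLoop_eq (stack : List Char) (result : String) :
    pvDrainLoop stack result = result ++ String.ofList stack.reverse := by
  induction stack using List.reverseRecOn generalizing result with
  | nil =>
    rw [pvDrainLoop]
    simp
  | append_singleton st c ih =>
    rw [pvDrainLoop]
    simp [ih]
    apply String.toList_inj.mp
    simp

theorem pvGetD_append (a l : List Char) (k : Nat) (d : Char) :
    (a ++ l).getD (a.length + k) d = l.getD k d := by
  simp [List.getD, List.getElem?_append_right]

theorem pvSet_append (a l : List Char) (k : Nat) (v : Char) :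
    (a ++ l).set (a.length + k) v = a ++ l.set k v := by
  simp

theorem pvSwapLoop_eq (n : Nat) : ∀ (a m b : List Char), m.length = n →
    pvSwapLoop (a ++ m ++ b) a.length (a.length + m.length - 1) = a ++ m.reverse ++ b := by
  induction n using Nat.strong_induction_on with
  | _ n ih =>
  intro a m b hm
  rcases m with _ | ⟨c, m1⟩
  · rw [pvSwapLoop, if_neg (by simp)]
    simp
  rcases m1.eq_nil_or_concat with rfl | ⟨m', d, rfl⟩
  all_goals try simp only [List.concat_eq_append] at hm ⊢
  · rw [pvSwapLoop, if_neg (by simp)]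
    simp
  · have hj : a.length + (c :: (m' ++ [d])).length - 1 = a.length + (m'.length + 1) := by
      simp
    have hcs : a ++ (c :: (m' ++ [d])) ++ b = a ++ (c :: (m' ++ d :: b)) := by simp
    rw [pvSwapLoop, if_pos (by simp), hj, hcs]
    have hgj : (a ++ (c :: (m' ++ d :: b))).getD (a.length + (m'.length + 1)) ' ' = d := by
      rw [pvGetD_append]
      show (m' ++ d :: b).getD (m'.length) ' ' = d
      have := pvGetD_append m' (d :: b) 0 ' '
      simp
    have hgi : (a ++ (c :: (m' ++ d :: b))).getD a.length ' ' = c := by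
      simp
    rw [hgj, hgi]
    have hs1 : (a ++ (c :: (m' ++ d :: b))).set a.length d = a ++ (d :: (m' ++ d :: b)) := by
      simp
    rw [hs1]
    have hs2 : (a ++ (d :: (m' ++ d :: b))).set (a.length + (m'.length + 1)) c
        = a ++ (d :: (m' ++ c :: b)) := by
      rw [pvSet_append]
      show a ++ ((d :: m' ++ d :: b).set (m'.length + 1) c) = _
      simp
    rw [hs2]
    have harg : a ++ (d :: (m' ++ c :: b)) = (a ++ [d]) ++ m' ++ (c :: b) := by simp
    have hidx : a.length + 1 = (a ++ [d]).length := by simp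
    have hjdx : a.length + (m'.length + 1) - 1 = (a ++ [d]).length + m'.length - 1 := by
      simp
    rw [harg, hidx, hjdx, ih m'.length (by simp at hm; omega) (a ++ [d]) m' (c :: b) rfl]
    simp

-- ===== VERDICT (by name: the statement is the Claim_ definition above) =====
theorem str_reverse_spec : Claim_equal_str_reverse := by
  intro s _
  unfold Spec_str_reverse str_reverse str_reverse_alt
  rw [pvPushLoop_eq, pvDrainLoop_eq]
  have h := pvSwapLoop_eq s.toList.length [] s.toList [] rfl
  simp at h ⊢
  rw [h]
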